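-- pv_equiv track=rewrite | github.com/MCFpy/mcf | mcf/general_purpose.py | cleaned_var_names
-- ===== SOURCE A (Python) =====
-- def cleaned_var_names(var_name):
--     """Clean variable names.
--
--     Cleaning variable by removing empty list and zero and None and putting
--     everything to upper case & removing duplicates
--
--     Parameters
--     ----------
--     var_name : List with variable names
--
--     Returns
--     -------
--     var_name2 : List with variable names
--
--     """
--     var_name1 = [s.upper() for s in var_name]
--     var_name2 = []
--     for var in var_name1:
--         if (var not in var_name2) and (var != '0') and (var != 0) and (
--                 var != []) and (var is not None):
--             var_name2.append(var)
--     return var_name2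
-- ===== SOURCE B (Python) =====
-- def cleaned_var_names(var_name):
--     """Clean variable names: upper-case, head-keep/tail-filter dedup, drop '0'-like entries."""
--     upper = [s.upper() for s in var_name]
--
--     def nub(lst):
--         out = []
--         while lst:
--             head = lst[0]
--             out.append(head)
--             rest = iter(lst)
--             next(rest)
--             lst = list(filter(head.__ne__, rest))
--         return out
--
--     return [v for v in nub(upper)
--             if v != '0' and v != 0 and v != [] and v is not None]
-- ===== Notes on version B (the rewrite author's own statement) =====
-- stated objective: alternative
-- what changed: Replaces A's single interleaved loop that tests membership in the growing output with a worklist nub (keep the current head, shrink the worklist by filtering out all its copies) followed by a separate filtering pass.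
import Mathlib
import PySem

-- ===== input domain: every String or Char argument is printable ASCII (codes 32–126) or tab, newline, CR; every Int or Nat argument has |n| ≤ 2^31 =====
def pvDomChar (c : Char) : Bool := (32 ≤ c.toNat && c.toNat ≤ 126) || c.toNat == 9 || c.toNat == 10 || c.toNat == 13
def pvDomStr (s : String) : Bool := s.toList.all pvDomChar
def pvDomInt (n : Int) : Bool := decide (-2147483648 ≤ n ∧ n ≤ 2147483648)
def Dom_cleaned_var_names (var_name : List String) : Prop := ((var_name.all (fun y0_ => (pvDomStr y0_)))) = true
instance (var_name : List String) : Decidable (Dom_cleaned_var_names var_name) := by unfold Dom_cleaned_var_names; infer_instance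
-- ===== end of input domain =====

-- B replaces A's interleaved membership-test loop with a worklist nub (keep the head, shrink the
-- worklist by filtering out its copies) followed by a separate filter pass (alternative decomposition).

-- ===== PORT A =====
-- A: upper-case all, then one loop appending var if it is not already in the output and passes the
-- value checks.  On a List String the checks 'var != 0', 'var != []', 'var is not None' are always
-- true in Python, so only 'var != "0"' remains.
def cleaned_var_names (var_name : List String) : List String :=
  let var_name1 := var_name.map PySem.Str.upper
  var_name1.foldl
    (fun var_name2 v => if !var_name2.contains v && !(v == "0") then var_name2 ++ [v] else var_name2)
    []

-- ===== PORT B =====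
-- B's nub loop: keep the head, continue on the worklist with all copies of the head filtered out
-- (Source B's while loop, written as the recursion on the shrinking worklist).
def pvNub : List String → List String
  | [] => []
  | h :: t => h :: pvNub (t.filter (fun x => !(x == h)))
termination_by l => l.length
decreasing_by
  simp only [List.length_cons, List.length_unattach]
  exact Nat.lt_succ_of_le (le_trans (List.length_filter_le _ _) (by simp))

-- B: upper-case all, nub, then a separate filter pass (as in A's port, on strings only
-- the '"0"' comparison of the filter is non-trivial in Python).
def cleaned_var_names_alt (var_name : List String) : List String :=
  let upper := var_name.map PySem.Str.upper
  (pvNub upper).filter (fun v => !(v == "0"))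

-- ===== PRECONDITION & SPEC =====
def Spec_cleaned_var_names (var_name : List String) (out : List String) : Prop := out = cleaned_var_names_alt var_name
instance (var_name : List String) (out : List String) : Decidable (Spec_cleaned_var_names var_name out) := by unfold Spec_cleaned_var_names; infer_instance

-- ===== CLAIM (what is proved, stated in full; the proofs are below) =====
def Claim_equal_cleaned_var_names : Prop := ∀ (var_name : List String), Dom_cleaned_var_names var_name → Spec_cleaned_var_names var_name (cleaned_var_names var_name)

-- ===== LEMMAS AND PROOFS =====

-- A's loop starting from a filtered accumulator equals (dedup-fold, then filter).
theorem pv_loop_eq (l : List String) : ∀ (s : List String),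
    l.foldl
      (fun acc v => if !acc.contains v && !(v == "0") then acc ++ [v] else acc)
      (s.filter (fun v => !(v == "0")))
    = (l.foldl PySem.Set.add s).filter (fun v => !(v == "0")) := by
  induction l with
  | nil => intro s; rfl
  | cons v l ih =>
    intro s
    have step : (if !(s.filter (fun w => !(w == "0"))).contains v && !(v == "0")
          then s.filter (fun w => !(w == "0")) ++ [v]
          else s.filter (fun w => !(w == "0")))
        = (PySem.Set.add s v).filter (fun w => !(w == "0")) := by
      unfold PySem.Set.add
      by_cases hv : v = "0"
      · subst hv
        rw [if_neg (by simp)]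
        split <;> simp [List.filter_append]
      · have hc : (s.filter (fun w => !(w == "0"))).contains v = s.contains v := by
          simp [List.mem_filter, hv]
        rw [hc]
        by_cases hs : v ∈ s
        · simp [PySem.Set.contains, hs]
        · simp [PySem.Set.contains, hs, hv, List.filter_append]
    simp only [List.foldl_cons]
    rw [step]
    exact ih (PySem.Set.add s v)

-- The dedup fold with accumulator s equals s followed by the recursive nub of the not-yet-seen part.
theorem pv_foldl_add_eq_nub (l : List String) : ∀ (s : List String),
    l.foldl PySem.Set.add s = s ++ pvNub (l.filter (fun x => !(s.contains x))) := by
  induction l with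
  | nil => intro s; rw [pvNub.eq_def]; simp
  | cons v t ih =>
    intro s
    simp only [List.foldl_cons]
    by_cases hs : v ∈ s
    · have : PySem.Set.add s v = s := by
        simp [PySem.Set.add, PySem.Set.contains, hs]
      rw [this, ih s]
      have : (v :: t).filter (fun x => !(s.contains x)) = t.filter (fun x => !(s.contains x)) := by
        simp [hs]
      rw [this]
    · have hadd : PySem.Set.add s v = s ++ [v] := by
        simp [PySem.Set.add, PySem.Set.contains, hs]
      rw [hadd, ih (s ++ [v])]
      have hfc : (v :: t).filter (fun x => !(s.contains x))
          = v :: t.filter (fun x => !(s.contains x)) := by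
        simp [hs]
      have hff : t.filter (fun x => !((s ++ [v]).contains x))
          = (t.filter (fun x => !(s.contains x))).filter (fun x => !(x == v)) := by
        rw [List.filter_filter]
        apply List.filter_congr
        intro x _
        by_cases hx : x = v <;> simp [hx]
      rw [hff, hfc]
      conv_rhs => rw [pvNub.eq_def]
      simp [List.filter_filter]

-- ===== VERDICT (by name: the statement is the Claim_ definition above) =====
theorem cleaned_var_names_spec : Claim_equal_cleaned_var_names := by
  intro var_name _
  unfold Spec_cleaned_var_names cleaned_var_names cleaned_var_names_alt
  have h1 := pv_loop_eq (var_name.map PySem.Str.upper) []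
  have h2 := pv_foldl_add_eq_nub (var_name.map PySem.Str.upper) []
  simp only [List.filter_nil] at h1
  simp only [List.nil_append, List.contains_nil] at h2
  simp only [h1, h2]
  simp
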